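-- pv_equiv track=rewrite | github.com/youssefsaber0/Ai_connect4 | src/heuristics.py | max_vert
-- ===== SOURCE A (Python) =====
-- def max_vert(game, i, j, visited):
--     if i == 5:
--         visited[i][j][1] = True
--         return 1
--     if i + 1 > 5:
--         return 0
--     if game[i][j] != game[i + 1][j]:
--         visited[i][j][1] = True
--         return 1
--     if game[i][j] == game[i + 1][j]:
--         visited[i][j][1] = True
--         return max_vert(game, i + 1, j, visited) + 1
-- ===== SOURCE B (Python) =====
-- def max_vert(game, i, j, visited):
--     # Two-phase: first locate the stop row s of the vertical run, then mark
--     # visited[k][j][1] for all k in [i, s] and return the run length s - i + 1.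
--     if i > 5:
--         return 0
--     s = i
--     while s < 5 and game[s][j] == game[s + 1][j]:
--         s += 1
--     for k in range(i, s + 1):
--         visited[k][j][1] = True
--     return s - i + 1
-- ===== Notes on version B (the rewrite author's own statement) =====
-- stated objective: alternative
-- what changed: Replaced A's interleaved compare-then-mark recursion by a two-phase computation: a scan that finds the stop row of the vertical run, then a marking pass over range(i, s+1) and an arithmetic run length s - i + 1.
import Mathlib
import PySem

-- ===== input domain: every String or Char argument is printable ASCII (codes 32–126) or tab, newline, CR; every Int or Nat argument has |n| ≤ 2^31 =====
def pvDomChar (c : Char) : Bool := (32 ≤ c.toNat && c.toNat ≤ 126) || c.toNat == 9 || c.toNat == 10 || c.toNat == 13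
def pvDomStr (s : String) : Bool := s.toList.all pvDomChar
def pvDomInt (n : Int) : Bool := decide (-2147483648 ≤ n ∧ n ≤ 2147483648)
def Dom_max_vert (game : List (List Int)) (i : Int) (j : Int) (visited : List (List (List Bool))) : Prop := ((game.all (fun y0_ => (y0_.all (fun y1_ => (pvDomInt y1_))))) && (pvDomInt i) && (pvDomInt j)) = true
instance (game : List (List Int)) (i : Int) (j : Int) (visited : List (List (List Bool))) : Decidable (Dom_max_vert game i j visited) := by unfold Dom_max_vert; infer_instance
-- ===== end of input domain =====

-- B replaces A's interleaved compare-mark recursion by two phases (find the stop row, then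
-- mark the run and return its length by arithmetic); equal return values are proved, and both
-- programs perform the identical in-place marking of `visited` (not covered by the claim).

-- Models the statement `visited[i][j][1] = True`: `some ()` iff the assignment succeeds
-- (none = IndexError; assigning index 1 is valid iff the cell list has length ≥ 2).
def pvMark (visited : List (List (List Bool))) (i : Int) (j : Int) : Option Unit :=
  match PySem.List.pyGet? visited i with
  | none => none
  | some row =>
    match PySem.List.pyGet? row j with
    | none => none
    | some cell => if 2 ≤ cell.length then some () else none

-- Models `game[i][j]` (two subscripts, Python negative-index rule; none = IndexError).
def pvCell (game : List (List Int)) (i : Int) (j : Int) : Option Int :=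
  (PySem.List.pyGet? game i).bind (fun row => PySem.List.pyGet? row j)

-- ===== PORT A =====
-- Literal port of A's recursion; `none` where the Python raises.
def max_vertA (game : List (List Int)) (i : Int) (j : Int) (visited : List (List (List Bool))) : Option Int :=
  if i = 5 then
    (pvMark visited i j).map (fun _ => 1)
  else if i + 1 > 5 then some 0
  else
    (pvCell game i j).bind (fun g1 => (pvCell game (i + 1) j).bind (fun g2 =>
      if g1 ≠ g2 then (pvMark visited i j).map (fun _ => 1)
      else  -- A's final `if` re-tests equality, which holds here
        (pvMark visited i j).bind (fun _ =>
          (max_vertA game (i + 1) j visited).map (fun v => v + 1))))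
  termination_by (5 - i).toNat
  decreasing_by omega

def max_vert (game : List (List Int)) (i : Int) (j : Int) (visited : List (List (List Bool))) : Int :=
  (max_vertA game i j visited).getD 0

-- ===== PORT B =====
-- Phase 1: B's while-loop locating the stop row s of the run (none = IndexError in the scan).
def pvStop (game : List (List Int)) (j : Int) (s : Int) : Option Int :=
  if s < 5 then
    (pvCell game s j).bind (fun a => (pvCell game (s + 1) j).bind (fun b =>
      if a = b then pvStop game j (s + 1) else some s))
  else some s
  termination_by (5 - s).toNat
  decreasing_by omega

-- Phase 2: B's `for k in range(i, s + 1): visited[k][j][1] = True`.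
def pvMarkAll (visited : List (List (List Bool))) (j : Int) : List Int → Option Unit
  | [] => some ()
  | k :: ks => (pvMark visited k j).bind (fun _ => pvMarkAll visited j ks)

def max_vert_alt (game : List (List Int)) (i : Int) (j : Int) (visited : List (List (List Bool))) : Int :=
  if 5 < i then 0
  else
    ((pvStop game j i).bind (fun s =>
      (pvMarkAll visited j (PySem.List.pyRange i (s + 1) 1)).map (fun _ => s - i + 1))).getD 0

-- ===== PRECONDITION & SPEC =====
-- Exactly the inputs on which the Python A returns normally (no IndexError): for i ≥ 6 A touches
-- nothing; for i = 5 it only marks visited[5][j]; for i ≤ 4 it needs game row i to exist and, at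
-- every row k of the run it actually reaches (all consecutive column-j cells equal before k),
-- the game cells at k and k+1 and a markable visited cell at k (at k = 5 only the latter).
-- Negative i and j follow Python's negative-index rule, as in the ports.
def Pre_max_vert (game : List (List Int)) (i : Int) (j : Int) (visited : List (List (List Bool))) : Prop :=
  6 ≤ i ∨
  (i = 5 ∧ pvMark visited 5 j = some ()) ∨
  (i ≤ 4 ∧ -(game.length : Int) ≤ i ∧
    ∀ k ∈ PySem.List.pyRange i 6 1,
      (∀ m ∈ PySem.List.pyRange i k 1, pvCell game m j = pvCell game (m + 1) j) →
      (if k = 5 then pvMark visited 5 j = some ()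
       else pvCell game k j ≠ none ∧ pvCell game (k + 1) j ≠ none ∧ pvMark visited k j = some ()))
instance (game : List (List Int)) (i : Int) (j : Int) (visited : List (List (List Bool))) : Decidable (Pre_max_vert game i j visited) := by unfold Pre_max_vert; infer_instance

def pvWitness_max_vert : List (List Int) × Int × Int × List (List (List Bool)) :=
  ([[1], [1], [1], [2], [3], [3]], 0, 0,
   [[[false, false]], [[false, false]], [[false, false]], [[false, false]], [[false, false]], [[false, false]]])

def Spec_max_vert (game : List (List Int)) (i : Int) (j : Int) (visited : List (List (List Bool))) (out : Int) : Prop := out = max_vert_alt game i j visited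
instance (game : List (List Int)) (i : Int) (j : Int) (visited : List (List (List Bool))) (out : Int) : Decidable (Spec_max_vert game i j visited out) := by unfold Spec_max_vert; infer_instance

-- ===== CLAIM (what is proved, stated in full; the proofs are below) =====
def Claim_equal_max_vert : Prop := ∀ (game : List (List Int)) (i : Int) (j : Int) (visited : List (List (List Bool))), Dom_max_vert game i j visited → Pre_max_vert game i j visited → Spec_max_vert game i j visited (max_vert game i j visited)

-- ===== LEMMAS AND PROOFS =====

-- The stop scan never moves backwards.
theorem pvStop_ge (game : List (List Int)) (j : Int) :
    ∀ (n : ℕ) (s r : Int), (5 - s).toNat ≤ n → pvStop game j s = some r → s ≤ r := by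
  intro n
  induction n with
  | zero =>
    intro s r hle h
    rw [pvStop, if_neg (show ¬ s < 5 by omega)] at h
    injection h with h'; omega
  | succ n ih =>
    intro s r hle h
    rw [pvStop] at h
    by_cases h5 : s < 5
    · rw [if_pos h5] at h
      cases hc1 : pvCell game s j with
      | none => rw [hc1] at h; simp at h
      | some a =>
        cases hc2 : pvCell game (s + 1) j with
        | none => rw [hc1, hc2] at h; simp at h
        | some b =>
          rw [hc1, hc2] at h
          simp only [Option.bind_some] at h
          by_cases hab : a = b
          · rw [if_pos hab] at h
            have := ih (s + 1) r (by omega) h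
            omega
          · rw [if_neg hab] at h
            injection h with h'; omega
    · rw [if_neg h5] at h
      injection h with h'; omega

-- A's one-pass recursion equals B's two-phase computation, as Option-valued programs.
theorem max_vertA_eq (game : List (List Int)) (j : Int) (visited : List (List (List Bool))) :
    ∀ (n : ℕ) (i : Int), (5 - i).toNat ≤ n → i ≤ 5 →
      max_vertA game i j visited =
        (pvStop game j i).bind (fun s =>
          (pvMarkAll visited j (PySem.List.pyRange i (s + 1) 1)).map (fun _ => s - i + 1)) := by
  intro n
  induction n with
  | zero =>
    intro i hle hi5
    have h : i = 5 := by omega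
    subst h
    rw [max_vertA, pvStop, if_pos rfl, if_neg (show ¬ (5:Int) < 5 by omega)]
    simp only [Option.bind_some, PySem.List.pyRange_one_singleton, pvMarkAll]
    cases pvMark visited 5 j <;> simp
  | succ n ih =>
    intro i hle hi5
    by_cases h5 : i = 5
    · subst h5
      rw [max_vertA, pvStop, if_pos rfl, if_neg (show ¬ (5:Int) < 5 by omega)]
      simp only [Option.bind_some, PySem.List.pyRange_one_singleton, pvMarkAll]
      cases pvMark visited 5 j <;> simp
    · have hlt : i < 5 := by omega
      rw [max_vertA, pvStop, if_neg h5, if_neg (show ¬ i + 1 > 5 by omega), if_pos hlt]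
      cases hc1 : pvCell game i j with
      | none => simp
      | some g1 =>
        cases hc2 : pvCell game (i + 1) j with
        | none => simp
        | some g2 =>
          simp only [Option.bind_some]
          by_cases hne : g1 ≠ g2
          · rw [if_pos hne, if_neg (show ¬ g1 = g2 from hne)]
            simp only [Option.bind_some, PySem.List.pyRange_one_singleton, pvMarkAll]
            cases pvMark visited i j <;> simp
          · have heq : g1 = g2 := by tauto
            rw [if_neg hne, if_pos heq]
            cases hs : pvStop game j (i + 1) with
            | none =>
              rw [ih (i + 1) (by omega) (by omega), hs]
              cases pvMark visited i j <;> simp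
            | some s =>
              have hge : i + 1 ≤ s := pvStop_ge game j (5 - (i + 1)).toNat (i + 1) s le_rfl hs
              rw [ih (i + 1) (by omega) (by omega), hs]
              simp only [Option.bind_some]
              rw [PySem.List.pyRange_one_cons (show i < s + 1 by omega)]
              simp only [pvMarkAll]
              cases pvMark visited i j with
              | none => simp
              | some u =>
                cases pvMarkAll visited j (PySem.List.pyRange (i + 1) (s + 1) 1) with
                | none => simp
                | some v => simp; omega

theorem max_vert_eq_alt (game : List (List Int)) (i : Int) (j : Int) (visited : List (List (List Bool))) :
    max_vert game i j visited = max_vert_alt game i j visited := by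
  unfold max_vert max_vert_alt
  by_cases hbig : 5 < i
  · rw [if_pos hbig, max_vertA, if_neg (show ¬ i = 5 by omega), if_pos (show i + 1 > 5 by omega)]
    rfl
  · rw [if_neg hbig,
      max_vertA_eq game j visited (5 - i).toNat i le_rfl (by omega)]

-- ===== VERDICT (by name: the statement is the Claim_ definition above) =====
theorem max_vert_spec : Claim_equal_max_vert := by
  intro game i j visited _ _
  exact max_vert_eq_alt game i j visited
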